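-- pv_equiv track=rewrite | github.com/shubhamag91/poker_ai | code/scripts/report_postflop_hero_deeper_actions.py | extract_river_action_lines
-- ===== SOURCE A (Python) =====
-- def extract_river_action_lines(hand: str) -> list[str]:
--     lines = hand.splitlines()
--     start = None
--     for i, line in enumerate(lines):
--         if line.startswith("*** RIVER ***"):
--             start = i + 1
--             break
--     if start is None:
--         return []
--
--     end = len(lines)
--     for i in range(start, len(lines)):
--         if lines[i].startswith("*** SUMMARY ***"):
--             end = i
--             break
--     return [line.strip() for line in lines[start:end] if line.strip()]
-- ===== SOURCE B (Python) =====
-- def extract_river_action_lines(hand: str) -> list[str]: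
--     out = []
--     in_region = False
--     for line in hand.splitlines():
--         if not in_region:
--             if line.startswith("*** RIVER ***"):
--                 in_region = True
--         elif line.startswith("*** SUMMARY ***"):
--             break
--         else:
--             s = line.strip()
--             if s:
--                 out.append(s)
--     return out
-- ===== Notes on version B (the rewrite author's own statement) =====
-- stated objective: simpler
-- what changed: Replaces the two index-based search loops plus slice-and-comprehend with a single collecting pass over the lines driven by an in_region flag.
import Mathlib
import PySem

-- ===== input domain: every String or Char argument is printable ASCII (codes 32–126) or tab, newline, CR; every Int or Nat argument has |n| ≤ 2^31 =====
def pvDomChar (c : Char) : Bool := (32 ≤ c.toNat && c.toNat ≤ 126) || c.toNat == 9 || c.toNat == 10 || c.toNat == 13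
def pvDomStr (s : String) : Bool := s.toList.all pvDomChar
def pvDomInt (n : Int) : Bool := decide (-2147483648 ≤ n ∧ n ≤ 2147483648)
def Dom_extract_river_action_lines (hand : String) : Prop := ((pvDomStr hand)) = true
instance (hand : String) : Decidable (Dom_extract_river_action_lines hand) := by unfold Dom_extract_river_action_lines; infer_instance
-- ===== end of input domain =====

-- B replaces A's find-start/find-end/slice structure by a single collecting scan with an
-- in_region flag (objective: simpler); same return value, proved equal for all inputs.

-- ===== PORT A =====
-- first loop: enumerate(lines), break at the first line starting with "*** RIVER ***"
def pvLoopA1 : List String → Nat → Option Nat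
  | [], _ => none
  | l :: rest, i =>
      if PySem.Str.startswith l "*** RIVER ***" then some (i + 1) else pvLoopA1 rest (i + 1)

-- second loop: for i in range(start, len(lines)), break at the first "*** SUMMARY ***" line
def pvLoopA2 (lines : List String) (i : Nat) : Nat :=
  if h : i < lines.length then
    if PySem.Str.startswith lines[i] "*** SUMMARY ***" then i else pvLoopA2 lines (i + 1)
  else lines.length
  termination_by lines.length - i

def extract_river_action_lines (hand : String) : List String :=
  let lines := PySem.Str.splitlines hand
  match pvLoopA1 lines 0 with
  | none => []
  | some start =>
      let e := pvLoopA2 lines start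
      (PySem.List.slice lines (some (start : Int)) (some (e : Int))).filterMap
        (fun line => let s := PySem.Str.strip line; if s = "" then none else some s)

-- ===== PORT B =====
-- single pass; the Bool is the in_region flag, break on SUMMARY is returning []
def pvBLoop : List String → Bool → List String
  | [], _ => []
  | l :: rest, false =>
      if PySem.Str.startswith l "*** RIVER ***" then pvBLoop rest true else pvBLoop rest false
  | l :: rest, true =>
      if PySem.Str.startswith l "*** SUMMARY ***" then []
      else
        let s := PySem.Str.strip l
        if s = "" then pvBLoop rest true else s :: pvBLoop rest true

def extract_river_action_lines_alt (hand : String) : List String :=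
  pvBLoop (PySem.Str.splitlines hand) false

-- ===== PRECONDITION & SPEC =====
def Spec_extract_river_action_lines (hand : String) (out : List String) : Prop := out = extract_river_action_lines_alt hand
instance (hand : String) (out : List String) : Decidable (Spec_extract_river_action_lines hand out) := by unfold Spec_extract_river_action_lines; infer_instance

-- ===== CLAIM (what is proved, stated in full; the proofs are below) =====
def Claim_equal_extract_river_action_lines : Prop := ∀ (hand : String), Dom_extract_river_action_lines hand → Spec_extract_river_action_lines hand (extract_river_action_lines hand)

-- ===== LEMMAS AND PROOFS =====

-- A's body as a function of the split line list
def pvABody (lines : List String) : List String :=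
  match pvLoopA1 lines 0 with
  | none => []
  | some start =>
      let e := pvLoopA2 lines start
      (PySem.List.slice lines (some (start : Int)) (some (e : Int))).filterMap
        (fun line => let s := PySem.Str.strip line; if s = "" then none else some s)

lemma pvLoopA1_shift (lines : List String) : ∀ i,
    pvLoopA1 lines i = (pvLoopA1 lines 0).map (· + i) := by
  induction lines with
  | nil => intro i; simp [pvLoopA1]
  | cons l rest ih =>
      intro i
      by_cases h : PySem.Str.startswith l "*** RIVER ***" = true
      · simp only [pvLoopA1, if_pos h, Option.map_some, Option.some.injEq]
        omega
      · simp only [pvLoopA1, if_neg h, ih 1, ih (i + 1)]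
        cases pvLoopA1 rest 0
        · simp
        · simp; omega

lemma pvLoopA2_cons (l : String) (lines : List String) (i : Nat) :
    pvLoopA2 (l :: lines) (i + 1) = pvLoopA2 lines i + 1 := by
  fun_induction pvLoopA2 lines i with
  | case1 i h hq =>
      rw [pvLoopA2, dif_pos (by simp; omega)]
      simp only [List.getElem_cons_succ]
      rw [if_pos hq]
  | case2 i h hq ih =>
      rw [pvLoopA2, dif_pos (by simp; omega)]
      simp only [List.getElem_cons_succ]
      rw [if_neg hq, ih]
  | case3 i h =>
      rw [pvLoopA2, dif_neg (by simp; omega)]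
      simp

-- true-phase: A's take-until-SUMMARY-and-strip equals B's in_region loop
lemma pvTrue_eq (rest : List String) :
    (rest.take (pvLoopA2 rest 0)).filterMap
        (fun line => let s := PySem.Str.strip line; if s = "" then none else some s)
      = pvBLoop rest true := by
  induction rest with
  | nil => simp [pvBLoop]
  | cons l rest ih =>
      rw [pvLoopA2, dif_pos (by simp)]
      simp only [List.getElem_cons_zero]
      by_cases hq : PySem.Str.startswith l "*** SUMMARY ***" = true
      · rw [if_pos hq]
        simp only [List.take_zero, List.filterMap_nil, pvBLoop]
        rw [if_pos hq]
      · rw [if_neg hq]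
        have : pvLoopA2 (l :: rest) (0 + 1) = pvLoopA2 rest 0 + 1 := pvLoopA2_cons l rest 0
        rw [show (0 + 1 : Nat) = 1 from rfl] at this
        rw [this]
        simp only [List.take_succ_cons, List.filterMap_cons, pvBLoop]
        rw [if_neg hq, ih]
        by_cases hs : PySem.Str.strip l = "" <;> simp [hs]

lemma pvABody_eq (lines : List String) : pvABody lines = pvBLoop lines false := by
  induction lines with
  | nil => simp [pvABody, pvLoopA1, pvBLoop]
  | cons l rest ih =>
      by_cases hp : PySem.Str.startswith l "*** RIVER ***" = true
      · simp only [pvABody, pvLoopA1, if_pos hp, pvBLoop]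
        have he : pvLoopA2 (l :: rest) 1 = pvLoopA2 rest 0 + 1 := pvLoopA2_cons l rest 0
        rw [he]
        rw [show ((0 + 1 : Nat) : Int) = ((1 : Nat) : Int) by norm_num]
        rw [PySem.List.slice_natCast]
        simp only [List.drop_one, List.tail_cons, Nat.add_sub_cancel]
        exact pvTrue_eq rest
      · simp only [pvABody, pvLoopA1, if_neg hp, pvBLoop]
        rw [pvLoopA1_shift rest 1]
        cases hA : pvLoopA1 rest 0 with
        | none =>
            simp only [pvABody, hA] at ih
            simp only [Option.map_none]
            exact ih
        | some s =>
            simp only [pvABody, hA] at ih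
            simp only [Option.map_some]
            rw [pvLoopA2_cons]
            rw [PySem.List.slice_natCast] at ih ⊢
            rw [← ih]
            simp only [List.drop_succ_cons]
            congr 2
            omega

-- ===== VERDICT (by name: the statement is the Claim_ definition above) =====
theorem extract_river_action_lines_spec : Claim_equal_extract_river_action_lines := by
  intro hand _
  show extract_river_action_lines hand = extract_river_action_lines_alt hand
  exact pvABody_eq (PySem.Str.splitlines hand)
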